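-- pv_equiv track=rewrite | github.com/Brandon-Valley/quick_serial_number | quick_sn/main.py | valid_sn
-- ===== SOURCE A (Python) =====
-- EXAMPLE_SN = '0243 8405 0296 3935 9212 2008'
--
-- def valid_sn(pot_sn):
--     if len(pot_sn) != len(EXAMPLE_SN):
--         return False
--
--     for char_num in range(len(pot_sn)):
--         cur_char = pot_sn[char_num]
--
--         if cur_char.isdigit() == False and cur_char != ' ':
--             return False
--
--         if cur_char.isdigit() != EXAMPLE_SN[char_num].isdigit():
--             return False
--     return True
-- ===== SOURCE B (Python) =====
-- EXAMPLE_SN = '0243 8405 0296 3935 9212 2008'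
--
-- def valid_sn(pot_sn):
--     if len(pot_sn) != len(EXAMPLE_SN):
--         return False
--     groups = pot_sn.split(' ')
--     expected = EXAMPLE_SN.split(' ')
--     return len(groups) == len(expected) and all(
--         len(g) == len(e) and g.isdigit() for g, e in zip(groups, expected))
-- ===== Notes on version B (the rewrite author's own statement) =====
-- stated objective: idiomatic
-- what changed: B splits the candidate on single spaces and validates token-by-token (group count and group lengths against the template's groups, each group all digits) instead of A's character-by-character positional scan against the template string.
import Mathlib
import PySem

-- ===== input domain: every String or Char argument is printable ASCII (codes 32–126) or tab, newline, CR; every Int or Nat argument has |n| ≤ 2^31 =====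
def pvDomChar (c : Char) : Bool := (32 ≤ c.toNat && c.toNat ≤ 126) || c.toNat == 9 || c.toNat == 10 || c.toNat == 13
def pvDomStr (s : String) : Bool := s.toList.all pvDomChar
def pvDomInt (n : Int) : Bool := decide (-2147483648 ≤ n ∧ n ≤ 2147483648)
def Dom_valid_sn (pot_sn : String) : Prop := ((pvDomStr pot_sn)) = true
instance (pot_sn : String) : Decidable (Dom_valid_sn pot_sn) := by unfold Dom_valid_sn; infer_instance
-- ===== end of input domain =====

-- B validates token-by-token (split on ' ', compare group count and lengths with the
-- template's groups, each group all digits) instead of A's character-by-character scan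
-- against the template; objective: idiomatic, same cost.

-- ===== PORT A =====
def pvExampleSN : String := "0243 8405 0296 3935 9212 2008"

-- A's for-loop with its two early returns; char_num ranges over range(len(pot_sn)),
-- so both index accesses are always in range and the .getD default is never used
def valid_sn_loop (pot_sn : String) : List Int → Bool
  | [] => true
  | char_num :: rest =>
    let cur_char := (PySem.Str.pyGet? pot_sn char_num).getD ' '
    let ex_char := (PySem.Str.pyGet? pvExampleSN char_num).getD ' '
    if PySem.Chars.isdigit cur_char = false ∧ cur_char ≠ ' ' then false
    else if PySem.Chars.isdigit cur_char ≠ PySem.Chars.isdigit ex_char then false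
    else valid_sn_loop pot_sn rest

def valid_sn (pot_sn : String) : Bool :=
  if PySem.Str.len pot_sn ≠ PySem.Str.len pvExampleSN then false
  else valid_sn_loop pot_sn (PySem.List.pyRange 0 (PySem.Str.len pot_sn) 1)

-- ===== PORT B =====
-- split(' ') with the non-empty separator " " never raises, so .getD [] is never used
def valid_sn_alt (pot_sn : String) : Bool :=
  if PySem.Str.len pot_sn ≠ PySem.Str.len pvExampleSN then false
  else
    let groups := (PySem.Str.split? pot_sn " ").getD []
    let expected := (PySem.Str.split? pvExampleSN " ").getD []
    decide (groups.length = expected.length) &&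
      (groups.zip expected).all
        (fun ge => decide (PySem.Str.len ge.1 = PySem.Str.len ge.2) && PySem.Str.strIsdigit ge.1)

-- ===== PRECONDITION & SPEC =====
def Spec_valid_sn (pot_sn : String) (out : Bool) : Prop := out = valid_sn_alt pot_sn
instance (pot_sn : String) (out : Bool) : Decidable (Spec_valid_sn pot_sn out) := by unfold Spec_valid_sn; infer_instance

-- ===== CLAIM (what is proved, stated in full; the proofs are below) =====
def Claim_equal_valid_sn : Prop := ∀ (pot_sn : String), Dom_valid_sn pot_sn → Spec_valid_sn pot_sn (valid_sn pot_sn)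

-- ===== LEMMAS AND PROOFS =====

-- PySem.Chars.splitOn with a single-character separator is Mathlib's List.splitOn
theorem pv_go_single (c : Char) : ∀ (fuel : Nat) (l cur : List Char) (acc : List (List Char)), l.length < fuel →
    PySem.Chars.splitOn.go [c] fuel l cur acc
      = acc.reverse ++ (List.splitOn c l).modifyHead (cur.reverse ++ ·) := by
  intro fuel
  induction fuel with
  | zero => intro l cur acc h; omega
  | succ f ih =>
    intro l cur acc h
    cases l with
    | nil =>
      show (cur.reverse :: acc).reverse = _
      simp [List.splitOn, List.splitOnP_nil]
    | cons a rest =>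
      rw [PySem.Chars.splitOn.go.eq_def]
      simp only []
      by_cases hac : c = a
      · subst hac
        rw [if_pos (by simp [List.isPrefixOf])]
        simp only [List.length_cons, List.length_nil, List.drop_succ_cons, List.drop_zero]
        rw [ih rest [] (cur.reverse :: acc) (by simpa using h)]
        rcases hsp : List.splitOn c rest with _ | ⟨g, gs⟩
        · exact absurd hsp (List.splitOnP_ne_nil _ _)
        · rw [List.splitOn, List.splitOnP_cons, if_pos (by simp)]
          rw [List.splitOn] at hsp
          simp [hsp]
      · rw [if_neg (by simp [List.isPrefixOf, hac])]
        rw [ih rest (a :: cur) acc (by simpa using h)]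
        rcases hsp : List.splitOn c rest with _ | ⟨g, gs⟩
        · exact absurd hsp (List.splitOnP_ne_nil _ _)
        · rw [List.splitOn, List.splitOnP_cons, if_neg (by simp [Ne.symm hac])]
          rw [List.splitOn] at hsp
          simp [hsp]

theorem pv_splitOn_single (l : List Char) (c : Char) :
    PySem.Chars.splitOn l [c] = List.splitOn c l := by
  have h := pv_go_single c (l.length + 1) l [] [] (by omega)
  rcases hsp : List.splitOn c l with _ | ⟨g, gs⟩
  · exact absurd hsp (List.splitOnP_ne_nil _ _)
  · rw [PySem.Chars.splitOn]
    rw [hsp] at h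
    simpa using h

def pvRange29 : List Int := [0,1,2,3,4,5,6,7,8,9,10,11,12,13,14,15,16,17,18,19,20,21,22,23,24,25,26,27,28]

def pvStepOK (l : List Char) (i : Int) : Prop :=
  let c := (PySem.List.pyGet? l i).getD ' '
  let t := (PySem.List.pyGet? pvExampleSN.toList i).getD ' '
  ¬(PySem.Chars.isdigit c = false ∧ c ≠ ' ') ∧ PySem.Chars.isdigit c = PySem.Chars.isdigit t

theorem pv_tpl : pvExampleSN.toList = ['0','2','4','3',' ','8','4','0','5',' ','0','2','9','6',' ','3','9','3','5',' ','9','2','1','2',' ','2','0','0','8'] := by decide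

theorem pv_digit_ne_space {c : Char} (h : PySem.Chars.isdigit c = true) : c ≠ ' ' := by
  rintro rfl; exact absurd h (by decide)

theorem pv_loop_true_iff (s : String) (is : List Int) :
    valid_sn_loop s is = true ↔ ∀ i ∈ is, pvStepOK s.toList i := by
  induction is with
  | nil => simp [valid_sn_loop]
  | cons i is ih =>
    simp only [valid_sn_loop, PySem.Str.pyGet?, PySem.Chars.pyGet?_eq_listPyGet?]
    split_ifs with h1 h2
    · simp only [false_iff]
      intro hall
      exact (hall i (List.mem_cons_self)).1 h1
    · simp only [false_iff]
      intro hall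
      exact h2 (hall i (List.mem_cons_self)).2
    · rw [ih]
      simp only [List.forall_mem_cons]
      exact (and_iff_right ⟨h1, not_ne_iff.mp h2⟩).symm

theorem pv_zip_all (gs es : List (List Char)) (hlen : gs.length = es.length)
    (hes : ∀ e ∈ es, e.length = 4) :
    ((gs.zip es).all fun p => decide (p.1.length = p.2.length) && PySem.Chars.strIsdigit p.1) = true
      ↔ ∀ g ∈ gs, g.length = 4 ∧ PySem.Chars.strIsdigit g = true := by
  induction gs generalizing es with
  | nil => simp
  | cons g gs ih =>
    cases es with
    | nil => simp at hlen
    | cons e es =>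
      have he : e.length = 4 := hes e (by simp)
      simp only [List.zip_cons_cons, List.all_cons, List.forall_mem_cons, Bool.and_eq_true,
        decide_eq_true_eq, ih es (by simpa using hlen) (fun x hx => hes x (by simp [hx])), he]

theorem pv_split_bridge (t : String) :
    (PySem.Str.split? t " ").getD [] = (List.splitOn ' ' t.toList).map String.ofList := by
  simp [PySem.Str.split?, PySem.Chars.split?, pv_splitOn_single]

theorem pv_alt_true_iff (s : String) (h29 : s.toList.length = 29) :
    valid_sn_alt s = true ↔
      (List.splitOn ' ' s.toList).length = 6 ∧
        ∀ g ∈ List.splitOn ' ' s.toList, g.length = 4 ∧ PySem.Chars.strIsdigit g = true := by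
  have hlenEx : PySem.Str.len pvExampleSN = 29 := by decide
  have hlen : ¬(PySem.Str.len s ≠ PySem.Str.len pvExampleSN) := by
    simp only [PySem.Str.len, h29]; decide
  have hexp : (List.splitOn ' ' pvExampleSN.toList) =
      [['0','2','4','3'],['8','4','0','5'],['0','2','9','6'],['3','9','3','5'],['9','2','1','2'],['2','0','0','8']] := by
    rw [← pv_splitOn_single]; decide
  unfold valid_sn_alt
  rw [if_neg hlen]
  simp only [pv_split_bridge, hexp]
  set gs := List.splitOn ' ' s.toList with hgs
  have hz : ∀ (es : List (List Char)),
      ((gs.map String.ofList).zip (es.map String.ofList)).all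
          (fun ge => decide (PySem.Str.len ge.1 = PySem.Str.len ge.2) && PySem.Str.strIsdigit ge.1)
        = (gs.zip es).all fun p => decide (p.1.length = p.2.length) && PySem.Chars.strIsdigit p.1 := by
    intro es
    simp [List.zip_map, List.all_map, Function.comp_def, PySem.Str.len, PySem.Str.strIsdigit]
  constructor
  · intro hb
    rw [Bool.and_eq_true, decide_eq_true_eq, List.length_map] at hb
    obtain ⟨hl6, hzz⟩ := hb
    rw [hz] at hzz
    refine ⟨by simpa using hl6, ?_⟩
    exact (pv_zip_all gs _ (by simp [hl6]) (by decide)).mp hzz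
  · rintro ⟨hl6, hall⟩
    rw [Bool.and_eq_true, decide_eq_true_eq, List.length_map]
    refine ⟨by simpa using hl6, ?_⟩
    rw [hz]
    exact (pv_zip_all gs _ (by simp [hl6]) (by decide)).mpr hall

theorem pv_d0 : PySem.Chars.isdigit '0' = true := by decide
theorem pv_d2 : PySem.Chars.isdigit '2' = true := by decide
theorem pv_d3 : PySem.Chars.isdigit '3' = true := by decide
theorem pv_d4 : PySem.Chars.isdigit '4' = true := by decide
theorem pv_d5 : PySem.Chars.isdigit '5' = true := by decide
theorem pv_d6 : PySem.Chars.isdigit '6' = true := by decide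
theorem pv_d8 : PySem.Chars.isdigit '8' = true := by decide
theorem pv_d9 : PySem.Chars.isdigit '9' = true := by decide
theorem pv_d1 : PySem.Chars.isdigit '1' = true := by decide

theorem pv_central (l : List Char) (h29 : l.length = 29) :
    (∀ i ∈ pvRange29, pvStepOK l i) ↔
      ((List.splitOn ' ' l).length = 6 ∧
        ∀ g ∈ List.splitOn ' ' l, g.length = 4 ∧ PySem.Chars.strIsdigit g = true) := by
  constructor
  · intro h
    rcases l with _|⟨c0, l⟩
    · simp at h29
    rw [List.length_cons] at h29
    replace h29 : l.length = 28 := by omega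
    rcases l with _|⟨c1, l⟩
    · simp at h29
    rw [List.length_cons] at h29
    replace h29 : l.length = 27 := by omega
    rcases l with _|⟨c2, l⟩
    · simp at h29
    rw [List.length_cons] at h29
    replace h29 : l.length = 26 := by omega
    rcases l with _|⟨c3, l⟩
    · simp at h29
    rw [List.length_cons] at h29
    replace h29 : l.length = 25 := by omega
    rcases l with _|⟨c4, l⟩
    · simp at h29
    rw [List.length_cons] at h29
    replace h29 : l.length = 24 := by omega
    rcases l with _|⟨c5, l⟩
    · simp at h29
    rw [List.length_cons] at h29
    replace h29 : l.length = 23 := by omega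
    rcases l with _|⟨c6, l⟩
    · simp at h29
    rw [List.length_cons] at h29
    replace h29 : l.length = 22 := by omega
    rcases l with _|⟨c7, l⟩
    · simp at h29
    rw [List.length_cons] at h29
    replace h29 : l.length = 21 := by omega
    rcases l with _|⟨c8, l⟩
    · simp at h29
    rw [List.length_cons] at h29
    replace h29 : l.length = 20 := by omega
    rcases l with _|⟨c9, l⟩
    · simp at h29
    rw [List.length_cons] at h29
    replace h29 : l.length = 19 := by omega
    rcases l with _|⟨c10, l⟩
    · simp at h29
    rw [List.length_cons] at h29
    replace h29 : l.length = 18 := by omega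
    rcases l with _|⟨c11, l⟩
    · simp at h29
    rw [List.length_cons] at h29
    replace h29 : l.length = 17 := by omega
    rcases l with _|⟨c12, l⟩
    · simp at h29
    rw [List.length_cons] at h29
    replace h29 : l.length = 16 := by omega
    rcases l with _|⟨c13, l⟩
    · simp at h29
    rw [List.length_cons] at h29
    replace h29 : l.length = 15 := by omega
    rcases l with _|⟨c14, l⟩
    · simp at h29
    rw [List.length_cons] at h29
    replace h29 : l.length = 14 := by omega
    rcases l with _|⟨c15, l⟩
    · simp at h29
    rw [List.length_cons] at h29
    replace h29 : l.length = 13 := by omega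
    rcases l with _|⟨c16, l⟩
    · simp at h29
    rw [List.length_cons] at h29
    replace h29 : l.length = 12 := by omega
    rcases l with _|⟨c17, l⟩
    · simp at h29
    rw [List.length_cons] at h29
    replace h29 : l.length = 11 := by omega
    rcases l with _|⟨c18, l⟩
    · simp at h29
    rw [List.length_cons] at h29
    replace h29 : l.length = 10 := by omega
    rcases l with _|⟨c19, l⟩
    · simp at h29
    rw [List.length_cons] at h29
    replace h29 : l.length = 9 := by omega
    rcases l with _|⟨c20, l⟩
    · simp at h29
    rw [List.length_cons] at h29
    replace h29 : l.length = 8 := by omega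
    rcases l with _|⟨c21, l⟩
    · simp at h29
    rw [List.length_cons] at h29
    replace h29 : l.length = 7 := by omega
    rcases l with _|⟨c22, l⟩
    · simp at h29
    rw [List.length_cons] at h29
    replace h29 : l.length = 6 := by omega
    rcases l with _|⟨c23, l⟩
    · simp at h29
    rw [List.length_cons] at h29
    replace h29 : l.length = 5 := by omega
    rcases l with _|⟨c24, l⟩
    · simp at h29
    rw [List.length_cons] at h29
    replace h29 : l.length = 4 := by omega
    rcases l with _|⟨c25, l⟩
    · simp at h29
    rw [List.length_cons] at h29
    replace h29 : l.length = 3 := by omega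
    rcases l with _|⟨c26, l⟩
    · simp at h29
    rw [List.length_cons] at h29
    replace h29 : l.length = 2 := by omega
    rcases l with _|⟨c27, l⟩
    · simp at h29
    rw [List.length_cons] at h29
    replace h29 : l.length = 1 := by omega
    rcases l with _|⟨c28, l⟩
    · simp at h29
    rw [List.length_cons] at h29
    replace h29 : l.length = 0 := by omega
    have hnil : l = [] := List.eq_nil_of_length_eq_zero h29
    subst hnil
    simp only [pvRange29, List.forall_mem_cons] at h
    obtain ⟨h0,h1,h2,h3,h4,h5,h6,h7,h8,h9,h10,h11,h12,h13,h14,h15,h16,h17,h18,h19,h20,h21,h22,h23,h24,h25,h26,h27,h28, -⟩ := h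
    simp only [pvStepOK, PySem.List.pyGet?, PySem.List.pyIdx?, pv_tpl] at h0 h1 h2 h3 h4 h5 h6 h7 h8 h9 h10 h11 h12 h13 h14 h15 h16 h17 h18 h19 h20 h21 h22 h23 h24 h25 h26 h27 h28
    simp at h0 h1 h2 h3 h4 h5 h6 h7 h8 h9 h10 h11 h12 h13 h14 h15 h16 h17 h18 h19 h20 h21 h22 h23 h24 h25 h26 h27 h28
    obtain rfl : c4 = ' ' := h4.1 h4.2
    obtain rfl : c9 = ' ' := h9.1 h9.2
    obtain rfl : c14 = ' ' := h14.1 h14.2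
    obtain rfl : c19 = ' ' := h19.1 h19.2
    obtain rfl : c24 = ' ' := h24.1 h24.2
    have d0 : PySem.Chars.isdigit c0 = true := h0.2
    have n0 : c0 ≠ ' ' := pv_digit_ne_space d0
    have d1 : PySem.Chars.isdigit c1 = true := h1.2
    have n1 : c1 ≠ ' ' := pv_digit_ne_space d1
    have d2 : PySem.Chars.isdigit c2 = true := h2.2
    have n2 : c2 ≠ ' ' := pv_digit_ne_space d2
    have d3 : PySem.Chars.isdigit c3 = true := h3.2
    have n3 : c3 ≠ ' ' := pv_digit_ne_space d3
    have d5 : PySem.Chars.isdigit c5 = true := h5.2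
    have n5 : c5 ≠ ' ' := pv_digit_ne_space d5
    have d6 : PySem.Chars.isdigit c6 = true := h6.2
    have n6 : c6 ≠ ' ' := pv_digit_ne_space d6
    have d7 : PySem.Chars.isdigit c7 = true := h7.2
    have n7 : c7 ≠ ' ' := pv_digit_ne_space d7
    have d8 : PySem.Chars.isdigit c8 = true := h8.2
    have n8 : c8 ≠ ' ' := pv_digit_ne_space d8
    have d10 : PySem.Chars.isdigit c10 = true := h10.2
    have n10 : c10 ≠ ' ' := pv_digit_ne_space d10
    have d11 : PySem.Chars.isdigit c11 = true := h11.2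
    have n11 : c11 ≠ ' ' := pv_digit_ne_space d11
    have d12 : PySem.Chars.isdigit c12 = true := h12.2
    have n12 : c12 ≠ ' ' := pv_digit_ne_space d12
    have d13 : PySem.Chars.isdigit c13 = true := h13.2
    have n13 : c13 ≠ ' ' := pv_digit_ne_space d13
    have d15 : PySem.Chars.isdigit c15 = true := h15.2
    have n15 : c15 ≠ ' ' := pv_digit_ne_space d15
    have d16 : PySem.Chars.isdigit c16 = true := h16.2
    have n16 : c16 ≠ ' ' := pv_digit_ne_space d16
    have d17 : PySem.Chars.isdigit c17 = true := h17.2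
    have n17 : c17 ≠ ' ' := pv_digit_ne_space d17
    have d18 : PySem.Chars.isdigit c18 = true := h18.2
    have n18 : c18 ≠ ' ' := pv_digit_ne_space d18
    have d20 : PySem.Chars.isdigit c20 = true := h20.2
    have n20 : c20 ≠ ' ' := pv_digit_ne_space d20
    have d21 : PySem.Chars.isdigit c21 = true := h21.2
    have n21 : c21 ≠ ' ' := pv_digit_ne_space d21
    have d22 : PySem.Chars.isdigit c22 = true := h22.2
    have n22 : c22 ≠ ' ' := pv_digit_ne_space d22
    have d23 : PySem.Chars.isdigit c23 = true := h23.2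
    have n23 : c23 ≠ ' ' := pv_digit_ne_space d23
    have d25 : PySem.Chars.isdigit c25 = true := h25.2
    have n25 : c25 ≠ ' ' := pv_digit_ne_space d25
    have d26 : PySem.Chars.isdigit c26 = true := h26.2
    have n26 : c26 ≠ ' ' := pv_digit_ne_space d26
    have d27 : PySem.Chars.isdigit c27 = true := h27.2
    have n27 : c27 ≠ ' ' := pv_digit_ne_space d27
    have d28 : PySem.Chars.isdigit c28 = true := h28.2
    have n28 : c28 ≠ ' ' := pv_digit_ne_space d28
    have hsp : List.splitOn ' ' [c0,c1,c2,c3,' ',c5,c6,c7,c8,' ',c10,c11,c12,c13,' ',c15,c16,c17,c18,' ',c20,c21,c22,c23,' ',c25,c26,c27,c28] = [[c0,c1,c2,c3],[c5,c6,c7,c8],[c10,c11,c12,c13],[c15,c16,c17,c18],[c20,c21,c22,c23],[c25,c26,c27,c28]] := by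
      simp [List.splitOn, List.splitOnP_cons, List.splitOnP_nil, n0, n1, n2, n3, n5, n6, n7, n8, n10, n11, n12, n13, n15, n16, n17, n18, n20, n21, n22, n23, n25, n26, n27, n28]
    rw [hsp]
    exact ⟨rfl, by simp [PySem.Chars.strIsdigit, d0, d1, d2, d3, d5, d6, d7, d8, d10, d11, d12, d13, d15, d16, d17, d18, d20, d21, d22, d23, d25, d26, d27, d28]⟩
  · rintro ⟨hlen6, hall⟩
    have hl := (List.intercalate_splitOn l ' ').symm
    rcases hq : List.splitOn ' ' l with _|⟨g1, gs⟩
    · exact absurd hq (List.splitOnP_ne_nil _ _)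
    rw [hq] at hl hlen6 hall
    rw [List.length_cons] at hlen6
    replace hlen6 : gs.length = 5 := by omega
    rcases gs with _|⟨g2, gs⟩
    · simp at hlen6
    rw [List.length_cons] at hlen6
    replace hlen6 : gs.length = 4 := by omega
    rcases gs with _|⟨g3, gs⟩
    · simp at hlen6
    rw [List.length_cons] at hlen6
    replace hlen6 : gs.length = 3 := by omega
    rcases gs with _|⟨g4, gs⟩
    · simp at hlen6
    rw [List.length_cons] at hlen6
    replace hlen6 : gs.length = 2 := by omega
    rcases gs with _|⟨g5, gs⟩
    · simp at hlen6
    rw [List.length_cons] at hlen6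
    replace hlen6 : gs.length = 1 := by omega
    rcases gs with _|⟨g6, gs⟩
    · simp at hlen6
    rw [List.length_cons] at hlen6
    replace hlen6 : gs.length = 0 := by omega
    obtain rfl : gs = [] := List.eq_nil_of_length_eq_zero hlen6
    simp only [List.forall_mem_cons] at hall
    obtain ⟨⟨hL1, hD1⟩, ⟨hL2, hD2⟩, ⟨hL3, hD3⟩, ⟨hL4, hD4⟩, ⟨hL5, hD5⟩, ⟨hL6, hD6⟩, -⟩ := hall
    rcases g1 with _|⟨a10, g1⟩
    · simp at hL1
    rw [List.length_cons] at hL1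
    replace hL1 : g1.length = 3 := by omega
    rcases g1 with _|⟨a11, g1⟩
    · simp at hL1
    rw [List.length_cons] at hL1
    replace hL1 : g1.length = 2 := by omega
    rcases g1 with _|⟨a12, g1⟩
    · simp at hL1
    rw [List.length_cons] at hL1
    replace hL1 : g1.length = 1 := by omega
    rcases g1 with _|⟨a13, g1⟩
    · simp at hL1
    rw [List.length_cons] at hL1
    replace hL1 : g1.length = 0 := by omega
    obtain rfl : g1 = [] := List.eq_nil_of_length_eq_zero hL1
    simp [PySem.Chars.strIsdigit] at hD1
    obtain ⟨e10, e11, e12, e13⟩ := hD1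
    rcases g2 with _|⟨a20, g2⟩
    · simp at hL2
    rw [List.length_cons] at hL2
    replace hL2 : g2.length = 3 := by omega
    rcases g2 with _|⟨a21, g2⟩
    · simp at hL2
    rw [List.length_cons] at hL2
    replace hL2 : g2.length = 2 := by omega
    rcases g2 with _|⟨a22, g2⟩
    · simp at hL2
    rw [List.length_cons] at hL2
    replace hL2 : g2.length = 1 := by omega
    rcases g2 with _|⟨a23, g2⟩
    · simp at hL2
    rw [List.length_cons] at hL2
    replace hL2 : g2.length = 0 := by omega
    obtain rfl : g2 = [] := List.eq_nil_of_length_eq_zero hL2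
    simp [PySem.Chars.strIsdigit] at hD2
    obtain ⟨e20, e21, e22, e23⟩ := hD2
    rcases g3 with _|⟨a30, g3⟩
    · simp at hL3
    rw [List.length_cons] at hL3
    replace hL3 : g3.length = 3 := by omega
    rcases g3 with _|⟨a31, g3⟩
    · simp at hL3
    rw [List.length_cons] at hL3
    replace hL3 : g3.length = 2 := by omega
    rcases g3 with _|⟨a32, g3⟩
    · simp at hL3
    rw [List.length_cons] at hL3
    replace hL3 : g3.length = 1 := by omega
    rcases g3 with _|⟨a33, g3⟩
    · simp at hL3
    rw [List.length_cons] at hL3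
    replace hL3 : g3.length = 0 := by omega
    obtain rfl : g3 = [] := List.eq_nil_of_length_eq_zero hL3
    simp [PySem.Chars.strIsdigit] at hD3
    obtain ⟨e30, e31, e32, e33⟩ := hD3
    rcases g4 with _|⟨a40, g4⟩
    · simp at hL4
    rw [List.length_cons] at hL4
    replace hL4 : g4.length = 3 := by omega
    rcases g4 with _|⟨a41, g4⟩
    · simp at hL4
    rw [List.length_cons] at hL4
    replace hL4 : g4.length = 2 := by omega
    rcases g4 with _|⟨a42, g4⟩
    · simp at hL4
    rw [List.length_cons] at hL4
    replace hL4 : g4.length = 1 := by omega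
    rcases g4 with _|⟨a43, g4⟩
    · simp at hL4
    rw [List.length_cons] at hL4
    replace hL4 : g4.length = 0 := by omega
    obtain rfl : g4 = [] := List.eq_nil_of_length_eq_zero hL4
    simp [PySem.Chars.strIsdigit] at hD4
    obtain ⟨e40, e41, e42, e43⟩ := hD4
    rcases g5 with _|⟨a50, g5⟩
    · simp at hL5
    rw [List.length_cons] at hL5
    replace hL5 : g5.length = 3 := by omega
    rcases g5 with _|⟨a51, g5⟩
    · simp at hL5
    rw [List.length_cons] at hL5
    replace hL5 : g5.length = 2 := by omega
    rcases g5 with _|⟨a52, g5⟩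
    · simp at hL5
    rw [List.length_cons] at hL5
    replace hL5 : g5.length = 1 := by omega
    rcases g5 with _|⟨a53, g5⟩
    · simp at hL5
    rw [List.length_cons] at hL5
    replace hL5 : g5.length = 0 := by omega
    obtain rfl : g5 = [] := List.eq_nil_of_length_eq_zero hL5
    simp [PySem.Chars.strIsdigit] at hD5
    obtain ⟨e50, e51, e52, e53⟩ := hD5
    rcases g6 with _|⟨a60, g6⟩
    · simp at hL6
    rw [List.length_cons] at hL6
    replace hL6 : g6.length = 3 := by omega
    rcases g6 with _|⟨a61, g6⟩
    · simp at hL6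
    rw [List.length_cons] at hL6
    replace hL6 : g6.length = 2 := by omega
    rcases g6 with _|⟨a62, g6⟩
    · simp at hL6
    rw [List.length_cons] at hL6
    replace hL6 : g6.length = 1 := by omega
    rcases g6 with _|⟨a63, g6⟩
    · simp at hL6
    rw [List.length_cons] at hL6
    replace hL6 : g6.length = 0 := by omega
    obtain rfl : g6 = [] := List.eq_nil_of_length_eq_zero hL6
    simp [PySem.Chars.strIsdigit] at hD6
    obtain ⟨e60, e61, e62, e63⟩ := hD6
    simp only [List.intercalate] at hl
    simp at hl
    subst hl
    simp [pvRange29, pvStepOK, PySem.List.pyGet?, PySem.List.pyIdx?, pv_d0, pv_d2, pv_d3, pv_d4, pv_d5, pv_d6, pv_d8, pv_d9, pv_d1, pv_tpl, e10, e11, e12, e13, e20, e21, e22, e23, e30, e31, e32, e33, e40, e41, e42, e43, e50, e51, e52, e53, e60, e61, e62, e63]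

-- ===== VERDICT (by name: the statement is the Claim_ definition above) =====
theorem valid_sn_spec : Claim_equal_valid_sn := by
  intro s _
  unfold Spec_valid_sn
  by_cases h29 : s.toList.length = 29
  · have hlen : ¬(PySem.Str.len s ≠ PySem.Str.len pvExampleSN) := by
      simp only [PySem.Str.len, h29]; decide
    have hrange : PySem.List.pyRange 0 (PySem.Str.len s) 1 = pvRange29 := by
      simp only [PySem.Str.len, h29]; decide
    rw [valid_sn, if_neg hlen, hrange, Bool.eq_iff_iff, pv_loop_true_iff, pv_alt_true_iff s h29]
    exact pv_central s.toList h29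
  · have hlen : PySem.Str.len s ≠ PySem.Str.len pvExampleSN := by
      have hlenEx : PySem.Str.len pvExampleSN = 29 := by decide
      rw [hlenEx, PySem.Str.len]
      intro hc
      exact h29 (by exact_mod_cast hc)
    rw [valid_sn, valid_sn_alt, if_pos hlen, if_pos hlen]
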